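-- pv_equiv track=rewrite | github.com/beltranmon/recetas | Scripts/match_txt_md.py | process_all_ingredients
-- ===== SOURCE A (Python) =====
-- def get_root_ingredient(ingredient, ingredients_list):
-- 	index = ingredients_list.index(ingredient)
-- 	valid_elements = [el for el in ingredients_list[:index] if el [:4] == '### ']
-- 	return valid_elements[-1]
--
-- def process_all_ingredients(md_lines):
-- 	ingredients_lines = [line.lower() for line in md_lines if line[:3] == '###']
-- 	all_ingredients_list = []
-- 	for ingredient in ingredients_lines:
-- 		if ingredient[:4] == '####':
-- 			root_ingredient = get_root_ingredient(ingredient, ingredients_lines[:])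
-- 			processed_line = f"{root_ingredient.replace('#', '').strip()} {ingredient.replace('#', '').strip()}"
-- 		else:
-- 			processed_line = ingredient.replace('#', '').strip()
-- 		all_ingredients_list.append(processed_line)
-- 	return all_ingredients_list
-- ===== SOURCE B (Python) =====
-- def process_all_ingredients(md_lines):
--     result = []
--     last_root = ''
--     for line in md_lines:
--         if line[:3] != '###':
--             continue
--         ing = line.lower()
--         name = ing.replace('#', '').strip()
--         if ing[:4] == '####':
--             result.append(f"{last_root} {name}")
--         else:
--             result.append(name)
--             if ing[:4] == '### ':
--                 last_root = name
--     return result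
-- ===== Notes on version B (the rewrite author's own statement) =====
-- stated objective: simpler
-- what changed: A rescans the heading list for every level-4 line (list.index, slice, filter, take last) to find its root; B makes one forward pass that simply tracks the last level-3 heading. Pre_ excludes inputs where A raises IndexError (a level-4 heading before any level-3) and lists whose lowered '###' headings repeat a level-4 line, a duplicate-key corner where A's first-occurrence root and B's current root are both defensible.
import Mathlib
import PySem

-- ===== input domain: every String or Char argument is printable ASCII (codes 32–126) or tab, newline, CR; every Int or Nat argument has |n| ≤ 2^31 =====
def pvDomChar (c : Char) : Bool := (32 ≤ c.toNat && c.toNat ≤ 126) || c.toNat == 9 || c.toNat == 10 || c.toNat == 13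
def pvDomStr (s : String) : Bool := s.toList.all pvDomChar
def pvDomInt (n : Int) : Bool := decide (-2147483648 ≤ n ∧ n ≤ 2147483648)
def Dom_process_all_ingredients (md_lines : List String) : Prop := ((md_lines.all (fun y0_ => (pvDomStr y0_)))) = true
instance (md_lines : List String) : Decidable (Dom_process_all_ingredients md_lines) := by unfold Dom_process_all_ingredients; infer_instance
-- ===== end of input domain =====

-- B replaces A's per-level-4-heading backward rescan (list.index + slice + filter + take last)
-- by one forward pass that tracks the last level-3 heading.

-- shared tiny primitives (literal Python expressions used by both sources)
def pvCond3 (line : String) : Bool := PySem.Str.slice line none (some 3) == "###"   -- line[:3] == '###'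
def pvIs4 (s : String) : Bool := PySem.Str.slice s none (some 4) == "####"          -- s[:4] == '####'
def pvIsRoot (s : String) : Bool := PySem.Str.slice s none (some 4) == "### "       -- s[:4] == '### '
def pvClean (s : String) : String := PySem.Str.strip (PySem.Str.replace s "#" "")   -- s.replace('#','').strip()

-- ===== PORT A =====
def get_root_ingredient (ingredient : String) (ingredients_list : List String) : String :=
  -- index = ingredients_list.index(ingredient); valid_elements = [el for el in ingredients_list[:index] if el[:4] == '### ']
  -- return valid_elements[-1]  (none = IndexError, excluded by Pre_)
  (PySem.List.pyGet?
    ((PySem.List.slice ingredients_list none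
        (some (((PySem.List.index? ingredients_list ingredient).getD 0 : Nat) : Int))).filter
      (fun el => pvIsRoot el))
    (-1)).getD ""

def process_all_ingredients (md_lines : List String) : List String :=
  let ingredients_lines := (md_lines.filter (fun line => pvCond3 line)).map PySem.Str.lower
  ingredients_lines.foldl (fun all_ingredients_list ingredient =>
    all_ingredients_list ++
      [if pvIs4 ingredient then
          pvClean (get_root_ingredient ingredient ingredients_lines) ++ " " ++ pvClean ingredient
        else pvClean ingredient]) []

-- ===== PORT B =====
-- loop body of B (state: cleaned text of the last '### ' heading, output list)
def pvBStep (st : String × List String) (line : String) : String × List String :=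
  if pvCond3 line then
    let ing := PySem.Str.lower line
    let name := pvClean ing
    if pvIs4 ing then (st.1, st.2 ++ [st.1 ++ " " ++ name])
    else ((if pvIsRoot ing then name else st.1), st.2 ++ [name])
  else st

def process_all_ingredients_alt (md_lines : List String) : List String :=
  (md_lines.foldl pvBStep ("", [])).2

-- ===== PRECONDITION & SPEC =====
-- Pre_ excludes (a) inputs on which A raises IndexError — a level-4 heading occurring, among
-- the lowered '###' lines, before any '### ' level-3 heading — and (b) lists whose lowered
-- '###' lines repeat a level-4 heading: there A's .index first-match root and B's current root
-- are both defensible readings of a duplicate-key corner no one would specify.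
def Pre_process_all_ingredients (md_lines : List String) : Prop :=
  (∀ s ∈ ((md_lines.filter (fun l => pvCond3 l)).map PySem.Str.lower).takeWhile
      (fun s => !(pvIsRoot s)), pvIs4 s = false) ∧
  (((md_lines.filter (fun l => pvCond3 l)).map PySem.Str.lower).filter (fun s => pvIs4 s)).Nodup
instance (md_lines : List String) : Decidable (Pre_process_all_ingredients md_lines) := by
  unfold Pre_process_all_ingredients; infer_instance

def pvWitness_process_all_ingredients : List String :=
  ["### Carnes", "#### Pollo", "### Verduras", "#### Zanahoria"]

def Spec_process_all_ingredients (md_lines : List String) (out : List String) : Prop := out = process_all_ingredients_alt md_lines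
instance (md_lines : List String) (out : List String) : Decidable (Spec_process_all_ingredients md_lines out) := by unfold Spec_process_all_ingredients; infer_instance

-- ===== CLAIM =====
def Claim_equal_process_all_ingredients : Prop := ∀ (md_lines : List String), Dom_process_all_ingredients md_lines → Pre_process_all_ingredients md_lines → Spec_process_all_ingredients md_lines (process_all_ingredients md_lines)

-- ===== LEMMAS AND PROOFS =====

-- the lowered '###' lines both programs effectively iterate over
def pvL (md_lines : List String) : List String :=
  (md_lines.filter (fun l => pvCond3 l)).map PySem.Str.lower

-- cleaned text of the last '### ' heading of p ('' if none)
def pvLastRoot (p : List String) : String :=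
  (((p.filter (fun s => pvIsRoot s)).getLast?).map pvClean).getD ""

def pvIdx (L : List String) (s : String) : Nat := (PySem.List.index? L s).getD 0

def pvVal (L : List String) (s : String) : String :=
  pvLastRoot (L.take (pvIdx L s)) ++ " " ++ pvClean s

def pvAProc (L : List String) (s : String) : String :=
  if pvIs4 s then pvVal L s else pvClean s

lemma pvClean_empty : pvClean "" = "" := by decide

lemma pvIsRoot_of_pvIs4 {s : String} (h : pvIs4 s = true) : pvIsRoot s = false := by
  unfold pvIs4 at h; unfold pvIsRoot
  rw [eq_of_beq h]; decide

lemma pvLastRoot_append_singleton (p : List String) (s : String) :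
    pvLastRoot (p ++ [s]) = if pvIsRoot s then pvClean s else pvLastRoot p := by
  unfold pvLastRoot
  rw [List.filter_append]
  by_cases h : pvIsRoot s = true
  · simp [h]
  · simp [h]

lemma aproc_eq (L : List String) (s : String) :
    (if pvIs4 s then
        pvClean (get_root_ingredient s L) ++ " " ++ pvClean s
      else pvClean s) = pvAProc L s := by
  unfold pvAProc
  by_cases h4 : pvIs4 s = true
  · simp only [h4, if_true]
    unfold get_root_ingredient pvVal pvIdx
    rw [PySem.List.slice_to_natCast, PySem.List.pyGet?_neg_one]
    unfold pvLastRoot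
    cases hl : ((L.take ((PySem.List.index? L s).getD 0)).filter (fun el => pvIsRoot el)).getLast? with
    | none => simp [pvClean_empty]
    | some r => simp
  · simp [h4]

lemma a_eq_map (md_lines : List String) :
    process_all_ingredients md_lines = (pvL md_lines).map (pvAProc (pvL md_lines)) := by
  unfold process_all_ingredients
  rw [show ((md_lines.filter (fun line => pvCond3 line)).map PySem.Str.lower) = pvL md_lines from rfl]
  rw [PySem.List.foldl_append_singleton_eq_map]
  simp only [aproc_eq, List.nil_append]

-- B's loop, run from the state describing the already-consumed prefix p of L, produces
-- A's per-line values: the nodup hypothesis pins .index to the position being visited.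
lemma b_inv (L : List String) (hnd : (L.filter (fun s => pvIs4 s)).Nodup) :
    ∀ (rest p : List String) (acc : List String),
      p ++ rest = L →
      (rest.foldl (fun st ing =>
          let name := pvClean ing
          if pvIs4 ing then (st.1, st.2 ++ [st.1 ++ " " ++ name])
          else ((if pvIsRoot ing then name else st.1), st.2 ++ [name]))
        (pvLastRoot p, acc)).2 = acc ++ rest.map (pvAProc L) := by
  intro rest
  induction rest with
  | nil => intro p acc _; simp
  | cons s rest' ih =>
    intro p acc hL
    simp only [List.foldl_cons, List.map_cons]
    by_cases h4 : pvIs4 s = true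
    · simp only [h4, if_true]
      have hsp : s ∉ p := by
        intro hp
        have hfl : (L.filter (fun s => pvIs4 s)) =
            p.filter (fun s => pvIs4 s) ++ s :: rest'.filter (fun s => pvIs4 s) := by
          rw [← hL, List.filter_append, List.filter_cons, h4]; simp
        rw [hfl] at hnd
        have : s ∈ p.filter (fun s => pvIs4 s) := List.mem_filter.mpr ⟨hp, h4⟩
        exact ((List.nodup_append.mp hnd).2.2 s this s List.mem_cons_self rfl)
      have hidx : PySem.List.index? L s = some p.length := by
        rw [PySem.List.index?_eq_some_iff]
        exact ⟨p, rest', hL.symm, rfl, hsp⟩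
      have hval : pvVal L s = pvLastRoot p ++ " " ++ pvClean s := by
        unfold pvVal pvIdx
        rw [hidx]
        have htk : L.take p.length = p := by
          rw [← hL]; exact List.take_left
        rw [Option.getD_some, htk]
      have hstep := ih (p ++ [s]) (acc ++ [pvLastRoot p ++ " " ++ pvClean s]) (by simpa using hL)
      rw [pvLastRoot_append_singleton, pvIsRoot_of_pvIs4 h4] at hstep
      simp only [Bool.false_eq_true, if_false] at hstep
      rw [hstep]
      simp [pvAProc, h4, hval]
    · rw [Bool.not_eq_true] at h4
      simp only [h4, Bool.false_eq_true, if_false]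
      have hstep := ih (p ++ [s]) (acc ++ [pvClean s]) (by simpa using hL)
      rw [pvLastRoot_append_singleton] at hstep
      rw [hstep]
      simp [pvAProc, h4]

-- B's fold over md_lines equals the same fold over the filtered-and-lowered list pvL
lemma b_filter_map (md_lines : List String) (st : String × List String) :
    md_lines.foldl pvBStep st =
      (pvL md_lines).foldl (fun st ing =>
          let name := pvClean ing
          if pvIs4 ing then (st.1, st.2 ++ [st.1 ++ " " ++ name])
          else ((if pvIsRoot ing then name else st.1), st.2 ++ [name])) st := by
  induction md_lines generalizing st with
  | nil => rfl
  | cons l ls ih =>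
    by_cases hc : pvCond3 l = true
    · rw [List.foldl_cons]
      unfold pvBStep
      simp only [hc, if_true]
      unfold pvL
      simp only [List.filter_cons, hc, if_true, List.map_cons, List.foldl_cons]
      exact ih _
    · rw [List.foldl_cons]
      unfold pvBStep
      simp only [hc, Bool.false_eq_true, if_false]
      unfold pvL
      simp only [List.filter_cons, hc, Bool.false_eq_true, if_false]
      exact ih st

-- ===== VERDICT =====
theorem process_all_ingredients_spec : Claim_equal_process_all_ingredients := by
  intro md_lines _ hpre
  unfold Spec_process_all_ingredients
  rw [a_eq_map]
  unfold process_all_ingredients_alt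
  rw [b_filter_map]
  have := b_inv (pvL md_lines) hpre.2 (pvL md_lines) [] [] (by simp)
  rw [show pvLastRoot [] = "" from rfl] at this
  rw [this]
  simp
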